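-- pv_equiv track=rewrite | github.com/commutatif/ctf_2019 | challs/101-chiffrement-de-vernam/attack/attack_mtp.py | get_xors
-- ===== SOURCE A (Python) =====
-- def get_xors(ciphers):
--     x = []
--     for i in range(len(ciphers)):
--         x0 = []
--         for j in range(len(ciphers)):
--             x0.append([a^b for a,b in zip(ciphers[i], ciphers[j])])
--         x.append(x0)
--     return x
-- ===== SOURCE B (Python) =====
-- def get_xors(ciphers):
--     n = len(ciphers)
--     x = [[None] * n for _ in range(n)]
--     for i in range(n):
--         for j in range(i, n):
--             row = [a ^ b for a, b in zip(ciphers[i], ciphers[j])]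
--             x[i][j] = row
--             if j != i:
--                 x[j][i] = list(row)
--     return x
-- ===== Notes on version B (the rewrite author's own statement) =====
-- stated objective: alternative
-- what changed: B preallocates the n x n grid and fills only the upper triangle, computing each unordered pair's XOR row once and mirroring a copy into the symmetric cell, instead of A's independent computation of all n^2 ordered pairs.
import Mathlib
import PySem

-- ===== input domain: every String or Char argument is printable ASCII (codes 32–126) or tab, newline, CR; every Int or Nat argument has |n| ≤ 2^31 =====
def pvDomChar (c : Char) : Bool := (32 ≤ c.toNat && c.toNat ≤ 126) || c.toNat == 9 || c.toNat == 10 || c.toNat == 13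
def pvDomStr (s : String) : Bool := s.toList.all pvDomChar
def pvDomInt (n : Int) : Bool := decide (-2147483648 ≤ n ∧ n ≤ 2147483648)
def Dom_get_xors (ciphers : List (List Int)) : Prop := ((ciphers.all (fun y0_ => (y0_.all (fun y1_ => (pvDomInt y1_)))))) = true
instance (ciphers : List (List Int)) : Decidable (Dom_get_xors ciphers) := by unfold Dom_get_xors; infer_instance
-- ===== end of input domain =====

-- B preallocates the grid and fills only the upper triangle of the symmetric XOR matrix,
-- mirroring a copy into the transposed cell (alternative traversal: each unordered pair once).


-- ===== PORT A =====
-- literal port: x = []; for i in range(n): x0 = []; for j in range(n): x0.append(row); x.append(x0)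
-- indices produced by range(len(ciphers)) are always in range, so getD is exact for ciphers[i]
def get_xors (ciphers : List (List Int)) : List (List (List Int)) :=
  (List.range ciphers.length).foldl (fun x i =>
    x ++ [(List.range ciphers.length).foldl (fun x0 j =>
      x0 ++ [((ciphers.getD i []).zip (ciphers.getD j [])).map
               (fun ab => PySem.Int.bxor ab.1 ab.2)]) []]) []

-- ===== PORT B =====
-- x[i][j] = v  (cells are Option to mirror the None-preallocated grid)
def pvSetCell (g : List (List (Option (List Int)))) (i j : Nat) (v : List Int) :
    List (List (Option (List Int))) :=
  g.set i ((g.getD i []).set j (some v))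

-- literal port of Source B: preallocate n×n None grid, fill upper triangle, mirror a copy below
def get_xors_alt (ciphers : List (List Int)) : List (List (List Int)) :=
  let n := ciphers.length
  let grid := (List.range n).foldl (fun g i =>
      (List.range' i (n - i)).foldl (fun g j =>
        let row := ((ciphers.getD i []).zip (ciphers.getD j [])).map
                     (fun ab => PySem.Int.bxor ab.1 ab.2)
        let g := pvSetCell g i j row
        if j ≠ i then pvSetCell g j i row else g) g)
    (List.replicate n (List.replicate n (none : Option (List Int))))
  grid.map (fun r => r.map (fun c => c.getD []))

-- ===== PRECONDITION & SPEC =====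
def Spec_get_xors (ciphers : List (List Int)) (out : List (List (List Int))) : Prop := out = get_xors_alt ciphers
instance (ciphers : List (List Int)) (out : List (List (List Int))) : Decidable (Spec_get_xors ciphers out) := by unfold Spec_get_xors; infer_instance

-- ===== CLAIM (what is proved, stated in full; the proofs are below) =====
def Claim_equal_get_xors : Prop := ∀ (ciphers : List (List Int)), Dom_get_xors ciphers → Spec_get_xors ciphers (get_xors ciphers)

-- ===== LEMMAS AND PROOFS =====

-- the XOR row of a pair of ciphertexts
def pvRow (cs : List (List Int)) (i j : Nat) : List Int :=
  ((cs.getD i []).zip (cs.getD j [])).map (fun ab => PySem.Int.bxor ab.1 ab.2)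

theorem pvRow_zip_comm (r s : List Int) :
    (r.zip s).map (fun ab => PySem.Int.bxor ab.1 ab.2)
      = (s.zip r).map (fun ab => PySem.Int.bxor ab.1 ab.2) := by
  induction r generalizing s with
  | nil => cases s <;> simp
  | cons a r ih =>
    cases s with
    | nil => simp
    | cons b s => simp [ih, PySem.Int.bxor_comm]

theorem pvRow_comm (cs : List (List Int)) (i j : Nat) : pvRow cs i j = pvRow cs j i := by
  simpa [pvRow] using pvRow_zip_comm (cs.getD i []) (cs.getD j [])

theorem foldl_append_map {α β : Type} (l : List α) (f : α → β) (a : List β) :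
    l.foldl (fun acc x => acc ++ [f x]) a = a ++ l.map f := by
  induction l generalizing a with
  | nil => simp
  | cons x l ih => simp [ih]

-- the common matrix both programs compute
def pvMat (cs : List (List Int)) : List (List (List Int)) :=
  (List.range cs.length).map (fun i => (List.range cs.length).map (fun j => pvRow cs i j))

theorem get_xors_eq_mat (cs : List (List Int)) : get_xors cs = pvMat cs := by
  unfold get_xors pvMat
  rw [foldl_append_map]
  simp only [List.nil_append]
  refine List.map_congr_left (fun i _ => ?_)
  rw [foldl_append_map]
  simp [pvRow]

def pvCell (g : List (List (Option (List Int)))) (p q : Nat) : Option (List Int) :=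
  (g.getD p []).getD q none

-- shape invariant
def pvShape (n : Nat) (g : List (List (Option (List Int)))) : Prop :=
  g.length = n ∧ ∀ k, k < n → (g.getD k []).length = n

theorem pvShape_set {n : Nat} {g : List (List (Option (List Int)))} (h : pvShape n g)
    (i j : Nat) (v : List Int) : pvShape n (pvSetCell g i j v) := by
  obtain ⟨hl, hr⟩ := h
  refine ⟨by simp [pvSetCell, hl], fun k hk => ?_⟩
  simp only [pvSetCell, List.getD_eq_getElem?_getD]
  by_cases hki : k = i
  · subst hki
    rw [List.getElem?_set_self (by omega)]
    simpa [List.getD_eq_getElem?_getD] using hr k hk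
  · rw [List.getElem?_set_ne (by omega)]
    simpa [List.getD_eq_getElem?_getD] using hr k hk

theorem pvCell_set {n : Nat} {g : List (List (Option (List Int)))} (h : pvShape n g)
    (i j p q : Nat) (hi : i < n) (hj : j < n) (hp : p < n) (hq : q < n) (v : List Int) :
    pvCell (pvSetCell g i j v) p q = if p = i ∧ q = j then some v else pvCell g p q := by
  obtain ⟨hl, hr⟩ := h
  simp only [pvCell, pvSetCell, List.getD_eq_getElem?_getD]
  by_cases hpi : p = i
  · subst hpi
    rw [List.getElem?_set_self (by omega)]
    simp only [Option.getD_some]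
    have hrow : (g[p]?.getD ([] : List (Option (List Int)))).length = n := by
      have := hr p hp; simpa [List.getD_eq_getElem?_getD] using this
    by_cases hqj : q = j
    · subst hqj
      rw [List.getElem?_set_self (by omega)]
      simp
    · rw [List.getElem?_set_ne (by omega)]
      simp [hqj]
  · rw [List.getElem?_set_ne (by omega)]
    simp [hpi]

-- the set of cells filled after the outer loop has reached i and the inner loop has reached jend
abbrev pvCond (i jend p q : Nat) : Prop := min p q < i ∨ (min p q = i ∧ max p q < jend)

theorem inner_inv (cs : List (List Int)) (n : Nat) (hn : n = cs.length)
    (i : Nat) (hi : i < n) :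
    ∀ (m j0 : Nat) (g : List (List (Option (List Int)))), i ≤ j0 → j0 + m ≤ n →
    pvShape n g →
    (∀ p q, p < n → q < n →
       pvCell g p q = if pvCond i j0 p q then some (pvRow cs p q) else none) →
    pvShape n ((List.range' j0 m).foldl (fun g j =>
        let row := ((cs.getD i []).zip (cs.getD j [])).map
                     (fun ab => PySem.Int.bxor ab.1 ab.2)
        let g := pvSetCell g i j row
        if j ≠ i then pvSetCell g j i row else g) g) ∧
    (∀ p q, p < n → q < n →
       pvCell ((List.range' j0 m).foldl (fun g j =>
        let row := ((cs.getD i []).zip (cs.getD j [])).map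
                     (fun ab => PySem.Int.bxor ab.1 ab.2)
        let g := pvSetCell g i j row
        if j ≠ i then pvSetCell g j i row else g) g) p q
         = if pvCond i (j0 + m) p q then some (pvRow cs p q) else none) := by
  intro m
  induction m with
  | zero =>
    intro j0 g hij hle hs H
    simpa using ⟨hs, H⟩
  | succ m ih =>
    intro j0 g hij hle hs H
    rw [List.range'_succ]
    simp only [List.foldl_cons]
    -- the state after processing j = j0
    by_cases hji : j0 ≠ i
    · simp only [ne_eq, hji, not_false_eq_true, if_true]
      have hs1 : pvShape n (pvSetCell (pvSetCell g i j0 (pvRow cs i j0)) j0 i (pvRow cs i j0)) :=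
        pvShape_set (pvShape_set hs i j0 _) j0 i _
      have H1 : ∀ p q, p < n → q < n →
          pvCell (pvSetCell (pvSetCell g i j0 (pvRow cs i j0)) j0 i (pvRow cs i j0)) p q
            = if pvCond i (j0 + 1) p q then some (pvRow cs p q) else none := by
        intro p q hp hq
        rw [pvCell_set (pvShape_set hs i j0 _) j0 i p q (by omega) hi hp hq,
            pvCell_set hs i j0 p q hi (by omega) hp hq, H p q hp hq]
        by_cases h1 : p = j0 ∧ q = i
        · have e1 := h1.1; have e2 := h1.2
          rw [if_pos h1, if_pos (show pvCond i (j0 + 1) p q by unfold pvCond; omega)]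
          rw [e1, e2, pvRow_comm]
        · rw [if_neg h1]
          by_cases h2 : p = i ∧ q = j0
          · have e1 := h2.1; have e2 := h2.2
            rw [if_pos h2, if_pos (show pvCond i (j0 + 1) p q by unfold pvCond; omega)]
            rw [e1, e2]
          · rw [if_neg h2]
            have hiff : pvCond i (j0 + 1) p q ↔ pvCond i j0 p q := by unfold pvCond; omega
            by_cases hc : pvCond i j0 p q
            · rw [if_pos hc, if_pos (hiff.mpr hc)]
            · rw [if_neg hc, if_neg (fun hx => hc (hiff.mp hx))]
      have := ih (j0 + 1) _ (by omega) (by omega) hs1 H1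
      simpa [Nat.add_assoc, Nat.add_comm, Nat.add_left_comm] using this
    · rw [Decidable.not_not] at hji
      subst hji
      simp only [ne_eq, not_true_eq_false, if_false]
      have hs1 : pvShape n (pvSetCell g j0 j0 (pvRow cs j0 j0)) := pvShape_set hs j0 j0 _
      have H1 : ∀ p q, p < n → q < n →
          pvCell (pvSetCell g j0 j0 (pvRow cs j0 j0)) p q
            = if pvCond j0 (j0 + 1) p q then some (pvRow cs p q) else none := by
        intro p q hp hq
        rw [pvCell_set hs j0 j0 p q hi hi hp hq, H p q hp hq]
        by_cases h1 : p = j0 ∧ q = j0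
        · have e1 := h1.1; have e2 := h1.2
          rw [if_pos h1, if_pos (show pvCond j0 (j0 + 1) p q by unfold pvCond; omega)]
          rw [e1, e2]
        · rw [if_neg h1]
          have hiff : pvCond j0 (j0 + 1) p q ↔ pvCond j0 j0 p q := by unfold pvCond; omega
          by_cases hc : pvCond j0 j0 p q
          · rw [if_pos hc, if_pos (hiff.mpr hc)]
          · rw [if_neg hc, if_neg (fun hx => hc (hiff.mp hx))]
      have := ih (j0 + 1) _ (by omega) (by omega) hs1 H1
      simpa [Nat.add_assoc, Nat.add_comm, Nat.add_left_comm] using this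

theorem outer_inv (cs : List (List Int)) (n : Nat) (hn : n = cs.length) :
    ∀ (m i0 : Nat) (g : List (List (Option (List Int)))), i0 + m ≤ n →
    pvShape n g →
    (∀ p q, p < n → q < n →
       pvCell g p q = if min p q < i0 then some (pvRow cs p q) else none) →
    pvShape n ((List.range' i0 m).foldl (fun g i =>
      (List.range' i (n - i)).foldl (fun g j =>
        let row := ((cs.getD i []).zip (cs.getD j [])).map
                     (fun ab => PySem.Int.bxor ab.1 ab.2)
        let g := pvSetCell g i j row
        if j ≠ i then pvSetCell g j i row else g) g) g) ∧
    (∀ p q, p < n → q < n →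
       pvCell ((List.range' i0 m).foldl (fun g i =>
      (List.range' i (n - i)).foldl (fun g j =>
        let row := ((cs.getD i []).zip (cs.getD j [])).map
                     (fun ab => PySem.Int.bxor ab.1 ab.2)
        let g := pvSetCell g i j row
        if j ≠ i then pvSetCell g j i row else g) g) g) p q
         = if min p q < i0 + m then some (pvRow cs p q) else none) := by
  intro m
  induction m with
  | zero =>
    intro i0 g hle hs H
    simp only [List.range'_zero, List.foldl_nil, Nat.add_zero]
    exact ⟨hs, H⟩
  | succ m ih =>
    intro i0 g hle hs H
    rw [List.range'_succ]
    simp only [List.foldl_cons]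
    have hi0 : i0 < n := by omega
    have H0 : ∀ p q, p < n → q < n →
        pvCell g p q = if pvCond i0 i0 p q then some (pvRow cs p q) else none := by
      intro p q hp hq
      rw [H p q hp hq]
      have hiff : pvCond i0 i0 p q ↔ min p q < i0 := by unfold pvCond; omega
      by_cases hc : min p q < i0
      · rw [if_pos hc, if_pos (hiff.mpr hc)]
      · rw [if_neg hc, if_neg (fun hx => hc (hiff.mp hx))]
    obtain ⟨hs1, H1⟩ := inner_inv cs n hn i0 hi0 (n - i0) i0 g (le_refl i0) (by omega) hs H0
    have H1' : ∀ p q, p < n → q < n →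
        pvCell ((List.range' i0 (n - i0)).foldl (fun g j =>
          let row := ((cs.getD i0 []).zip (cs.getD j [])).map
                       (fun ab => PySem.Int.bxor ab.1 ab.2)
          let g := pvSetCell g i0 j row
          if j ≠ i0 then pvSetCell g j i0 row else g) g) p q
          = if min p q < i0 + 1 then some (pvRow cs p q) else none := by
      intro p q hp hq
      rw [H1 p q hp hq]
      have hiff : pvCond i0 (i0 + (n - i0)) p q ↔ min p q < i0 + 1 := by
        unfold pvCond; omega
      by_cases hc : min p q < i0 + 1
      · rw [if_pos (hiff.mpr hc), if_pos hc]
      · rw [if_neg (fun hx => hc (hiff.mp hx)), if_neg hc]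
    have := ih (i0 + 1) _ (by omega) hs1 H1'
    simpa [Nat.add_assoc, Nat.add_comm, Nat.add_left_comm] using this

theorem get_xors_alt_eq_mat (cs : List (List Int)) : get_xors_alt cs = pvMat cs := by
  unfold get_xors_alt
  show ((List.range cs.length).foldl (fun g i =>
      (List.range' i (cs.length - i)).foldl (fun g j =>
        let row := ((cs.getD i []).zip (cs.getD j [])).map
                     (fun ab => PySem.Int.bxor ab.1 ab.2)
        let g := pvSetCell g i j row
        if j ≠ i then pvSetCell g j i row else g) g)
    (List.replicate cs.length (List.replicate cs.length (none : Option (List Int))))).map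
      (fun r => r.map (fun c => c.getD [])) = pvMat cs
  rw [List.range_eq_range']
  have hshape0 : pvShape cs.length
      (List.replicate cs.length (List.replicate cs.length (none : Option (List Int)))) := by
    refine ⟨by simp, fun k hk => ?_⟩
    rw [List.getD_eq_getElem?_getD, List.getElem?_replicate, if_pos hk]
    simp
  have H0 : ∀ p q, p < cs.length → q < cs.length →
      pvCell (List.replicate cs.length (List.replicate cs.length (none : Option (List Int)))) p q
        = if min p q < 0 then some (pvRow cs p q) else none := by
    intro p q hp hq
    rw [if_neg (by omega)]
    simp [pvCell, List.getD_eq_getElem?_getD, hp, hq]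
  obtain ⟨⟨hlen, hrows⟩, Hfin⟩ :=
    outer_inv cs cs.length rfl cs.length 0 _ (by omega) hshape0 H0
  set G := (List.range' 0 cs.length).foldl (fun g i =>
      (List.range' i (cs.length - i)).foldl (fun g j =>
        let row := ((cs.getD i []).zip (cs.getD j [])).map
                     (fun ab => PySem.Int.bxor ab.1 ab.2)
        let g := pvSetCell g i j row
        if j ≠ i then pvSetCell g j i row else g) g)
    (List.replicate cs.length (List.replicate cs.length (none : Option (List Int)))) with hG
  apply List.ext_getElem
  · simp [pvMat, hlen]
  · intro p h1 h2
    have hp : p < cs.length := by simpa [hlen] using h1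
    have hpG : p < G.length := by omega
    have hGp : G.getD p [] = G[p] := by
      rw [List.getD_eq_getElem?_getD, List.getElem?_eq_getElem hpG]
      rfl
    rw [List.getElem_map]
    simp only [pvMat, List.getElem_map, List.getElem_range]
    apply List.ext_getElem
    · have := hrows p hp
      rw [hGp] at this
      simp [this]
    · intro q hq1 hq2
      have hq : q < cs.length := by
        have := hrows p hp
        rw [hGp] at this
        simpa [this] using hq1
      have hcell := Hfin p q hp hq
      rw [if_pos (by omega)] at hcell
      unfold pvCell at hcell
      rw [hGp, List.getD_eq_getElem?_getD, List.getElem?_eq_getElem (by simpa using hq1)] at hcell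
      simp only [Option.getD_some] at hcell
      simp [hcell]

-- ===== VERDICT (by name: the statement is the Claim_ definition above) =====
theorem get_xors_spec : Claim_equal_get_xors := by
  intro cs _
  unfold Spec_get_xors
  rw [get_xors_eq_mat, get_xors_alt_eq_mat]
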